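-- pv_equiv track=rewrite | github.com/tc60045/scoutbook_parsing | eagle_review.py | has_satisfied_eagle
-- ===== SOURCE A (Python) =====
-- er_criticals = (
--     "Camping", "Citizenship in Society", "Cit. in Comm.", "Cit. in Nation",
--     "Cit. in World", "Communication", "Cooking", "Family Life", "First Aid",
--     "Pers. Fitness", "Personal Mgmt."
-- )
--
-- er_sport = ("Cycling", "Hiking", "Swimming")
--
-- er_emerg = ("Emergency Prep.", "Lifesaving")
--
-- er_enviro = ("Enviro. Science", "Sustainability")
--
-- def has_satisfied_eagle(requirements):
--     badges_earned = set(requirements.keys())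
--     criticals_satisfied = all(badge in badges_earned for badge in er_criticals)
--     sport_satisfied = any(badge in badges_earned for badge in er_sport)
--     emerg_satisfied = any(badge in badges_earned for badge in er_emerg)
--     enviro_satisfied = any(badge in badges_earned for badge in er_enviro)
--     total_badge_count = len(badges_earned)
--
--     return criticals_satisfied and sport_satisfied and emerg_satisfied and enviro_satisfied and total_badge_count >= 21
-- ===== SOURCE B (Python) =====
-- ER_CRITICALS = {
--     "Camping", "Citizenship in Society", "Cit. in Comm.", "Cit. in Nation",
--     "Cit. in World", "Communication", "Cooking", "Family Life", "First Aid",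
--     "Pers. Fitness", "Personal Mgmt."
-- }
-- ER_SPORT = {"Cycling", "Hiking", "Swimming"}
-- ER_EMERG = {"Emergency Prep.", "Lifesaving"}
-- ER_ENVIRO = {"Enviro. Science", "Sustainability"}
--
-- def has_satisfied_eagle(requirements):
--     matched_criticals = set()
--     sport = emerg = enviro = False
--     total = 0
--     for badge in requirements.keys():
--         total += 1
--         if badge in ER_CRITICALS:
--             matched_criticals.add(badge)
--         if badge in ER_SPORT:
--             sport = True
--         if badge in ER_EMERG:
--             emerg = True
--         if badge in ER_ENVIRO:
--             enviro = True
--     return len(matched_criticals) == len(ER_CRITICALS) and sport and emerg and enviro and total >= 21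
-- ===== Notes on version B (the rewrite author's own statement) =====
-- stated objective: alternative
-- what changed: A probes an earned-badge set once per element of each fixed requirement tuple; B makes a single pass over the earned badges, maintaining a matched-criticals set, three category flags and a total counter, and decides afterwards.
import Mathlib
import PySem

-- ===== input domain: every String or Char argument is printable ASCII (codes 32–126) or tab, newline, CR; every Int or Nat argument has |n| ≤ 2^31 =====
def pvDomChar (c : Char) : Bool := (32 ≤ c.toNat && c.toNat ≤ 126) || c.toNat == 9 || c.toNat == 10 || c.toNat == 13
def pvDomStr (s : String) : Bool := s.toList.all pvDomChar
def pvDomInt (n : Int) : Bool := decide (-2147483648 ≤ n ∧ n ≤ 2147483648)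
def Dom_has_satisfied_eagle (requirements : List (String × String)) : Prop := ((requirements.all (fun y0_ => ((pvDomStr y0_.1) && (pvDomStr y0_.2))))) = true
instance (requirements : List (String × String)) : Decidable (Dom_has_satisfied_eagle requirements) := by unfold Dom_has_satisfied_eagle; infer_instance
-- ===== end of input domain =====

-- B replaces A's per-category probing of an earned-badge set by a single accumulator
-- pass over the badge keys (alternative decomposition, same cost).
-- The dict parameter is the association list of a Python dict; its keys (first components) are distinct.

-- ===== PORT A =====
def er_criticals : List String :=
  ["Camping", "Citizenship in Society", "Cit. in Comm.", "Cit. in Nation",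
   "Cit. in World", "Communication", "Cooking", "Family Life", "First Aid",
   "Pers. Fitness", "Personal Mgmt."]

def er_sport : List String := ["Cycling", "Hiking", "Swimming"]

def er_emerg : List String := ["Emergency Prep.", "Lifesaving"]

def er_enviro : List String := ["Enviro. Science", "Sustainability"]

def has_satisfied_eagle (requirements : List (String × String)) : Bool :=
  let badges_earned : PySem.Set String := PySem.Set.ofList (requirements.map (·.1))
  let criticals_satisfied := er_criticals.all (fun badge => PySem.Set.contains badges_earned badge)
  let sport_satisfied := er_sport.any (fun badge => PySem.Set.contains badges_earned badge)
  let emerg_satisfied := er_emerg.any (fun badge => PySem.Set.contains badges_earned badge)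
  let enviro_satisfied := er_enviro.any (fun badge => PySem.Set.contains badges_earned badge)
  let total_badge_count := PySem.Set.len badges_earned
  criticals_satisfied && sport_satisfied && emerg_satisfied && enviro_satisfied
    && decide (21 ≤ total_badge_count)

-- ===== PORT B =====
def erCriticalsB : PySem.Set String :=
  PySem.Set.ofList
    ["Camping", "Citizenship in Society", "Cit. in Comm.", "Cit. in Nation",
     "Cit. in World", "Communication", "Cooking", "Family Life", "First Aid",
     "Pers. Fitness", "Personal Mgmt."]

def erSportB : PySem.Set String := PySem.Set.ofList ["Cycling", "Hiking", "Swimming"]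

def erEmergB : PySem.Set String := PySem.Set.ofList ["Emergency Prep.", "Lifesaving"]

def erEnviroB : PySem.Set String := PySem.Set.ofList ["Enviro. Science", "Sustainability"]

structure EagleSt where
  matched : PySem.Set String
  sport : Bool
  emerg : Bool
  enviro : Bool
  total : Nat
deriving Repr, DecidableEq

def eagleStep (st : EagleSt) (badge : String) : EagleSt :=
  let st := { st with total := st.total + 1 }
  let st := if PySem.Set.contains erCriticalsB badge
            then { st with matched := PySem.Set.add st.matched badge } else st
  let st := if PySem.Set.contains erSportB badge then { st with sport := true } else st
  let st := if PySem.Set.contains erEmergB badge then { st with emerg := true } else st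
  if PySem.Set.contains erEnviroB badge then { st with enviro := true } else st

def has_satisfied_eagle_alt (requirements : List (String × String)) : Bool :=
  -- the dict's keys: distinct first components in insertion order
  let keys := PySem.List.dedup (requirements.map (·.1))
  let st := keys.foldl eagleStep ⟨PySem.Set.empty, false, false, false, 0⟩
  (PySem.Set.len st.matched == PySem.Set.len erCriticalsB)
    && st.sport && st.emerg && st.enviro && decide (st.total ≥ 21)

-- ===== PRECONDITION & SPEC =====
def Spec_has_satisfied_eagle (requirements : List (String × String)) (out : Bool) : Prop := out = has_satisfied_eagle_alt requirements
instance (requirements : List (String × String)) (out : Bool) : Decidable (Spec_has_satisfied_eagle requirements out) := by unfold Spec_has_satisfied_eagle; infer_instance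

-- ===== CLAIM (what is proved, stated in full; the proofs are below) =====
def Claim_equal_has_satisfied_eagle : Prop := ∀ (requirements : List (String × String)), Dom_has_satisfied_eagle requirements → Spec_has_satisfied_eagle requirements (has_satisfied_eagle requirements)

-- ===== LEMMAS AND PROOFS =====

-- folding eagleStep over a list, characterised componentwise
theorem eagle_fold (l : List String) (st : EagleSt) :
    l.foldl eagleStep st =
      ⟨PySem.Set.update st.matched (l.filter (fun b => PySem.Set.contains erCriticalsB b)),
       st.sport || l.any (fun b => PySem.Set.contains erSportB b),
       st.emerg || l.any (fun b => PySem.Set.contains erEmergB b),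
       st.enviro || l.any (fun b => PySem.Set.contains erEnviroB b),
       st.total + l.length⟩ := by
  induction l generalizing st with
  | nil => simp [PySem.Set.update]
  | cons x xs ih =>
    simp only [List.foldl_cons, ih, List.filter_cons, List.any_cons, List.length_cons]
    unfold eagleStep
    split_ifs <;>
      simp_all [PySem.Set.update_cons] <;> omega

-- counting matched criticals: a nodup filter has full length iff every critical is present
theorem filter_len_iff (crit ks : List String) (hc : crit.Nodup) (hk : ks.Nodup) :
    (ks.filter (fun b => decide (b ∈ crit))).length = crit.length ↔ ∀ b ∈ crit, b ∈ ks := by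
  have hfn : (ks.filter (fun b => decide (b ∈ crit))).Nodup := hk.filter _
  have h1 : (ks.filter (fun b => decide (b ∈ crit))).length
      = (crit.toFinset ∩ ks.toFinset).card := by
    rw [← List.toFinset_card_of_nodup hfn, List.toFinset_filter]
    congr 1
    ext x
    simp [Finset.mem_inter, And.comm]
  rw [h1, ← List.toFinset_card_of_nodup hc]
  constructor
  · intro hcard b hb
    have hsub : crit.toFinset ∩ ks.toFinset ⊆ crit.toFinset := Finset.inter_subset_left
    have := Finset.eq_of_subset_of_card_le hsub (le_of_eq hcard.symm)
    have : crit.toFinset ⊆ ks.toFinset := by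
      rw [← this]; exact Finset.inter_subset_right
    simpa using this (List.mem_toFinset.mpr hb)
  · intro hsub
    have : crit.toFinset ∩ ks.toFinset = crit.toFinset := by
      rw [Finset.inter_eq_left]
      intro x hx
      exact List.mem_toFinset.mpr (hsub x (List.mem_toFinset.mp hx))
    rw [this]

-- two lists share an element: A probes the earned set per constant, B probes constant sets per key
theorem any_contains_comm (c S : List String) :
    c.any (fun x => PySem.Set.contains S x)
      = S.any (fun x => PySem.Set.contains (PySem.Set.ofList c) x) := by
  rw [Bool.eq_iff_iff]
  simp only [List.any_eq_true, PySem.Set.contains_iff, PySem.Set.mem_ofList]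
  tauto

-- ===== VERDICT (by name: the statement is the Claim_ definition above) =====
theorem has_satisfied_eagle_spec : Claim_equal_has_satisfied_eagle := by
  intro requirements _
  unfold Spec_has_satisfied_eagle has_satisfied_eagle has_satisfied_eagle_alt
  dsimp only
  rw [PySem.List.dedup_eq_ofList, eagle_fold]
  set S := PySem.Set.ofList (requirements.map (·.1)) with hS
  have hnk : S.Nodup := PySem.Set.nodup_ofList _
  have hpred : (fun x => PySem.Set.contains erCriticalsB x)
      = (fun x => decide (x ∈ er_criticals)) := by
    funext x
    rw [Bool.eq_iff_iff]
    simp [PySem.Set.mem_ofList, erCriticalsB, er_criticals]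
  have hmat : PySem.Set.update PySem.Set.empty
        (S.filter (fun x => PySem.Set.contains erCriticalsB x))
      = S.filter (fun x => PySem.Set.contains erCriticalsB x) := by
    rw [PySem.Set.update_empty, PySem.Set.ofList_eq_self_of_nodup _ (hnk.filter _)]
  have hcrit : (((S.filter (fun x => PySem.Set.contains erCriticalsB x)).length : Int)
        == ((erCriticalsB : List String).length : Int))
      = er_criticals.all (fun badge => PySem.Set.contains S badge) := by
    rw [Bool.eq_iff_iff]
    simp only [hpred, beq_iff_eq, Int.natCast_inj, List.all_eq_true, PySem.Set.contains_iff]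
    have h11 : (erCriticalsB : List String).length = er_criticals.length := by decide
    rw [h11]
    exact filter_len_iff er_criticals S (by decide) hnk
  have hsp : erSportB = PySem.Set.ofList er_sport := rfl
  have hem : erEmergB = PySem.Set.ofList er_emerg := rfl
  have hen : erEnviroB = PySem.Set.ofList er_enviro := rfl
  simp only [hmat, PySem.Set.len, hcrit, hsp, hem, hen, ← any_contains_comm er_sport S,
    ← any_contains_comm er_emerg S, ← any_contains_comm er_enviro S,
    Bool.false_or, Nat.zero_add]
  congr 1
  rw [Bool.eq_iff_iff]
  simp
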